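-- pv_equiv track=rewrite | github.com/YaswanthPalepu/Tech_Demo_Project_POC | src/framework_handlers/universal_handler.py | _guess_module
-- ===== SOURCE A (Python) =====
-- from typing import Any, Dict, List
--
-- def _guess_module(analysis: Dict[str, Any]) -> str:
--     """Guess the main module name based on structure or fallback."""
--     ps = analysis.get("project_structure", {}) or {}
--     module_paths = list(ps.get("module_paths", {}).keys()) if isinstance(ps, dict) else []
--     for pref in ("main.py", "__init__.py"):
--         for p in module_paths:
--             if p.lower().endswith(pref):
--                 return p.replace("/", ".").replace("\\", ".").rstrip(".py")
--     if module_paths: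
--         return module_paths[0].replace("/", ".").replace("\\", ".").rstrip(".py")
--     return "main"
-- ===== SOURCE B (Python) =====
-- def _guess_module(analysis):
--     """Guess the main module name based on structure or fallback."""
--     ps = analysis.get("project_structure", {}) or {}
--     module_paths = list(ps.get("module_paths", {}).keys()) if isinstance(ps, dict) else []
--     first_main = None
--     first_init = None
--     for p in module_paths:
--         low = p.lower()
--         if first_main is None and low.endswith("main.py"):
--             first_main = p
--         if first_init is None and low.endswith("__init__.py"):
--             first_init = p
--     chosen = first_main if first_main is not None else first_init
--     if chosen is None:
--         chosen = module_paths[0] if module_paths else None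
--     if chosen is None:
--         return "main"
--     return chosen.replace("/", ".").replace("\\", ".").rstrip(".py")
-- ===== Notes on version B (the rewrite author's own statement) =====
-- stated objective: alternative
-- what changed: Replaces A's two full priority scans (one per preferred suffix) with a single pass that maintains first_main/first_init accumulators and selects afterwards.
import Mathlib
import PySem

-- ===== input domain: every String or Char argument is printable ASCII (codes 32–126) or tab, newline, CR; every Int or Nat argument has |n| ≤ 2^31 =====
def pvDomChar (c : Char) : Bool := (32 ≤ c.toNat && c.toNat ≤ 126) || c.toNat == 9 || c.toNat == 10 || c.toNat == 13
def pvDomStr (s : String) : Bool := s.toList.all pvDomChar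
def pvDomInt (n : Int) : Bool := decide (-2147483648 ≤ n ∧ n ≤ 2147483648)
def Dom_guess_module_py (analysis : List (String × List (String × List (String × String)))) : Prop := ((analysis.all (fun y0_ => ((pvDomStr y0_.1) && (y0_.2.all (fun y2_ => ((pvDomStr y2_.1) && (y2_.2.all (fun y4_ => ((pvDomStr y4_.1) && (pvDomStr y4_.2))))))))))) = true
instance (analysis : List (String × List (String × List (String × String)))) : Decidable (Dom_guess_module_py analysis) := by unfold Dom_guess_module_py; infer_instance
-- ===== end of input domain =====

-- B is a single pass over module_paths with two accumulators instead of A's two priority scans; return values agree everywhere.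

-- ===== PORT A =====
-- s.rstrip(".py"): drop from the right every char in the set {'.','p','y'} (hand port; PySem has no rstrip-with-chars)
def pyRstripChars (s : String) (chars : List Char) : String :=
  String.mk ((s.toList.reverse.dropWhile (fun c => c ∈ chars)).reverse)

-- p.replace("/", ".").replace("\\", ".").rstrip(".py") — identical expression in both Pythons
def pvFmtPath (p : String) : String :=
  pyRstripChars (PySem.Str.replace (PySem.Str.replace p "/" ".") "\\" ".") ['.', 'p', 'y']

def pvModulePaths (analysis : List (String × List (String × List (String × String)))) : List String :=
  let ps := PySem.Dict.getD (PySem.Dict.mk analysis) "project_structure" []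
  (PySem.Dict.mk (PySem.Dict.getD (PySem.Dict.mk ps) "module_paths" [])).keys

-- A: for pref in ("main.py", "__init__.py") unrolled; inner loop = first match
def guess_module_py (analysis : List (String × List (String × List (String × String)))) : String :=
  let module_paths := pvModulePaths analysis
  match module_paths.find? (fun p => PySem.Str.endswith (PySem.Str.lower p) "main.py") with
  | some p => pvFmtPath p
  | none =>
    match module_paths.find? (fun p => PySem.Str.endswith (PySem.Str.lower p) "__init__.py") with
    | some p => pvFmtPath p
    | none =>
      match module_paths with
      | [] => "main"
      | p :: _ => pvFmtPath p

-- ===== PORT B =====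
def pvStepB (acc : Option String × Option String) (p : String) : Option String × Option String :=
  let low := PySem.Str.lower p
  (if acc.1.isNone && PySem.Str.endswith low "main.py" then some p else acc.1,
   if acc.2.isNone && PySem.Str.endswith low "__init__.py" then some p else acc.2)

def guess_module_py_alt (analysis : List (String × List (String × List (String × String)))) : String :=
  let ps := PySem.Dict.getD (PySem.Dict.mk analysis) "project_structure" []
  let module_paths := (PySem.Dict.mk (PySem.Dict.getD (PySem.Dict.mk ps) "module_paths" [])).keys
  let r := module_paths.foldl pvStepB (none, none)
  let chosen := match r.1 with | some p => some p | none => r.2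
  let chosen := match chosen with | some p => some p | none => module_paths.head?
  match chosen with
  | none => "main"
  | some p => pvFmtPath p

-- ===== PRECONDITION & SPEC =====
def Spec_guess_module_py (analysis : List (String × List (String × List (String × String)))) (out : String) : Prop := out = guess_module_py_alt analysis
instance (analysis : List (String × List (String × List (String × String)))) (out : String) : Decidable (Spec_guess_module_py analysis out) := by unfold Spec_guess_module_py; infer_instance

-- ===== CLAIM (what is proved, stated in full; the proofs are below) =====
def Claim_equal_guess_module_py : Prop := ∀ (analysis : List (String × List (String × List (String × String)))), Dom_guess_module_py analysis → Spec_guess_module_py analysis (guess_module_py analysis)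

-- ===== LEMMAS AND PROOFS =====

lemma pvFoldB (mps : List String) : ∀ a b, mps.foldl pvStepB (a, b) =
    (a.or (mps.find? (fun p => PySem.Str.endswith (PySem.Str.lower p) "main.py")),
     b.or (mps.find? (fun p => PySem.Str.endswith (PySem.Str.lower p) "__init__.py"))) := by
  induction mps with
  | nil => intro a b; simp
  | cons p mps ih =>
    intro a b
    rw [List.foldl_cons]
    simp only [pvStepB]
    cases a <;> cases b <;>
      cases hm : PySem.Str.endswith (PySem.Str.lower p) "main.py" <;>
      cases hi : PySem.Str.endswith (PySem.Str.lower p) "__init__.py" <;>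
      simp at hm hi <;> simp [ih, List.find?_cons, hm, hi]

-- ===== VERDICT (by name: the statement is the Claim_ definition above) =====
theorem guess_module_py_spec : Claim_equal_guess_module_py := by
  intro analysis _
  unfold Spec_guess_module_py guess_module_py guess_module_py_alt pvModulePaths
  simp only [pvFoldB, Option.or_none, Option.none_or]
  rcases hm : (PySem.Dict.mk (PySem.Dict.getD (PySem.Dict.mk (PySem.Dict.getD (PySem.Dict.mk analysis) "project_structure" [])) "module_paths" [])).keys.find? (fun p => PySem.Str.endswith (PySem.Str.lower p) "main.py") with _ | p
  · rcases hi : (PySem.Dict.mk (PySem.Dict.getD (PySem.Dict.mk (PySem.Dict.getD (PySem.Dict.mk analysis) "project_structure" [])) "module_paths" [])).keys.find? (fun p => PySem.Str.endswith (PySem.Str.lower p) "__init__.py") with _ | q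
    · cases h : (PySem.Dict.mk (PySem.Dict.getD (PySem.Dict.mk (PySem.Dict.getD (PySem.Dict.mk analysis) "project_structure" [])) "module_paths" [])).keys <;> simp [hm, hi, h, List.head?]
    · simp [hm, hi]
  · simp [hm]
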